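-- pv_equiv track=rewrite | github.com/linhdvu14/cp-sols | sols/CodeForces/1698_d2/C_3SUM_Closure.py | solve
-- ===== SOURCE A (Python) =====
-- def solve(N, A):
--     pos = neg = zero = 0
--     for a in A:
--         if a < 0: neg += 1
--         elif a > 0: pos += 1
--         else: zero += 1
--     if pos >= 3 or neg >=3: return 'NO'
--
--     known = set(A)
--     A = [a for a in A if a != 0]
--     for i in range(len(A)):
--         for j in range(i):
--             if zero and A[i] + A[j] not in known: return 'NO'
--             for k in range(j):
--                 if A[i] + A[j] + A[k] not in known: return 'NO'
--
--     return 'YES'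
-- ===== SOURCE B (Python) =====
-- def solve(N, A):
--     known = set(A)
--     n = len(A)
--     for i in range(n):
--         for j in range(i + 1, n):
--             for k in range(j + 1, n):
--                 if A[i] + A[j] + A[k] not in known:
--                     return 'NO'
--     return 'YES'
-- ===== Notes on version B (the rewrite author's own statement) =====
-- stated objective: simpler
-- what changed: Replaced A's count-based pigeonhole pruning, zero-filtering and mixed pair/triple checks with one plain brute-force scan: build set(A) once and test every index triple i<j<k of the original array (the pruned 'NO' cases are subsumed because three like-signed entries always yield a triple whose sum exceeds the array's extremes).
import Mathlib
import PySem

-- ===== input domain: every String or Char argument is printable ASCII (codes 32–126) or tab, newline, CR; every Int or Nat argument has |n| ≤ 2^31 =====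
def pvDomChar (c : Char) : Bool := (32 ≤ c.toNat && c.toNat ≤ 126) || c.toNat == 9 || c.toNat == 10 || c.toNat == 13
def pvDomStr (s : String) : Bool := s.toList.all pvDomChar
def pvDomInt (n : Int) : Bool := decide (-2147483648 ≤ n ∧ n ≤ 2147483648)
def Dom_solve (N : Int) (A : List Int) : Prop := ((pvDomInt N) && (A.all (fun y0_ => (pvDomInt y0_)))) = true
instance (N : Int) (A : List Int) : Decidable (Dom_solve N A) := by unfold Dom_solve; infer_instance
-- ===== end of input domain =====

-- B drops A's counting/pruning and zero-filtering and just checks every index triple i<j<k of the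
-- original array against set(A): a plainer single-idea implementation (not faster; A prunes more).

-- ===== PORT A =====
def solve (N : Int) (A : List Int) : String :=
  let c : Int × Int × Int := A.foldl (fun s a =>
      if a < 0 then (s.1, s.2.1 + 1, s.2.2)
      else if a > 0 then (s.1 + 1, s.2.1, s.2.2)
      else (s.1, s.2.1, s.2.2 + 1)) (0, 0, 0)
  if 3 ≤ c.1 ∨ 3 ≤ c.2.1 then "NO"
  else
    let known : PySem.Set Int := PySem.Set.ofList A
    let B : List Int := A.filter (fun a => decide (a ≠ 0))
    if (List.range B.length).any (fun i => (List.range i).any (fun j =>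
        (decide (c.2.2 ≠ 0) && !(known.contains (B[i]! + B[j]!))) ||
        (List.range j).any (fun k => !(known.contains (B[i]! + B[j]! + B[k]!)))))
    then "NO" else "YES"

-- ===== PORT B =====
def solve_alt (N : Int) (A : List Int) : String :=
  let known : PySem.Set Int := PySem.Set.ofList A
  let n := A.length
  if (List.range n).any (fun i => (List.range' (i+1) (n - (i+1))).any (fun j =>
       (List.range' (j+1) (n - (j+1))).any (fun k =>
         !(known.contains (A[i]! + A[j]! + A[k]!)))))
  then "NO" else "YES"

-- ===== PRECONDITION & SPEC =====
def Spec_solve (N : Int) (A : List Int) (out : String) : Prop := out = solve_alt N A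
instance (N : Int) (A : List Int) (out : String) : Decidable (Spec_solve N A out) := by unfold Spec_solve; infer_instance

-- ===== CLAIM (what is proved, stated in full; the proofs are below) =====
def Claim_equal_solve : Prop := ∀ (N : Int) (A : List Int), Dom_solve N A → Spec_solve N A (solve N A)

-- ===== LEMMAS AND PROOFS =====

-- "some 3-element sub-multiset of l sums outside A"
def Bad3 (l A : List Int) : Prop :=
  ∃ t : Multiset Int, t ≤ (l : Multiset Int) ∧ Multiset.card t = 3 ∧ t.sum ∉ A

-- "some 2-element sub-multiset of l sums outside A"
def Bad2 (l A : List Int) : Prop :=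
  ∃ t : Multiset Int, t ≤ (l : Multiset Int) ∧ Multiset.card t = 2 ∧ t.sum ∉ A


lemma cons_le_of_mem_of_le_erase {a : Int} {t s : Multiset Int}
    (h : a ∈ s) (h2 : t ≤ s.erase a) : a ::ₘ t ≤ s := by
  rw [Multiset.le_iff_count] at *
  intro x
  have hx := h2 x
  rw [Multiset.count_cons]
  by_cases hxa : x = a
  · subst hxa
    have h1 : Multiset.count x (s.erase x) = Multiset.count x s - 1 := Multiset.count_erase_self x s
    have h3 : 0 < Multiset.count x s := Multiset.count_pos.mpr h
    simp only [if_true]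
    omega
  · have h1 : Multiset.count x (s.erase a) = Multiset.count x s := Multiset.count_erase_of_ne hxa s
    simp only [if_neg hxa]
    omega

lemma foldl_count (l : List Int) (p n z : Int) :
    l.foldl (fun (s : Int × Int × Int) a =>
      if a < 0 then (s.1, s.2.1 + 1, s.2.2)
      else if a > 0 then (s.1 + 1, s.2.1, s.2.2)
      else (s.1, s.2.1, s.2.2 + 1)) (p, n, z)
    = (p + (l.countP fun a => decide (0 < a) : Nat),
       n + (l.countP fun a => decide (a < 0) : Nat),
       z + (l.countP fun a => decide (a = 0) : Nat)) := by
  induction l generalizing p n z with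
  | nil => simp
  | cons a l ih =>
    simp only [List.foldl_cons, List.countP_cons]
    rcases lt_trichotomy a 0 with h | h | h
    · rw [if_pos h, ih]
      simp [h]
      omega
    · subst h
      norm_num [ih]
      omega
    · rw [if_neg (by omega), if_pos h, ih]
      simp [h]
      omega

lemma triple_sublist (l : List Int) (k j i : Nat) (hkj : k < j) (hji : j < i) (hi : i < l.length) :
    List.Sublist [l[k]!, l[j]!, l[i]!] l := by
  have hj : j < l.length := by omega
  have hk : k < l.length := by omega
  rw [getElem!_pos l i hi, getElem!_pos l j hj, getElem!_pos l k hk]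
  have h1 : List.Sublist [l[i]] (l.drop (j+1)) := by
    rw [List.singleton_sublist]
    have hlen : i - (j+1) < (l.drop (j+1)).length := by
      rw [List.length_drop]; omega
    have : (l.drop (j+1))[i - (j+1)]'hlen = l[i] := by
      rw [List.getElem_drop]; congr 1; omega
    rw [← this]; exact List.getElem_mem _
  have h2 : List.Sublist [l[j], l[i]] (l.drop j) := by
    rw [← (List.getElem_cons_drop (as := l) (i := j))]
    exact List.Sublist.cons₂ _ h1
  have h3 : List.Sublist (l.drop j) (l.drop (k+1)) := by
    have : l.drop j = (l.drop (k+1)).drop (j - (k+1)) := by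
      rw [List.drop_drop]; congr 1; omega
    rw [this]; exact List.drop_sublist _ _
  have h4 : List.Sublist [l[k], l[j], l[i]] (l.drop k) := by
    rw [← (List.getElem_cons_drop (as := l) (i := k))]
    exact List.Sublist.cons₂ _ (h2.trans h3)
  exact h4.trans (List.drop_sublist _ _)

lemma pair_sublist (l : List Int) (j i : Nat) (hji : j < i) (hi : i < l.length) :
    List.Sublist [l[j]!, l[i]!] l := by
  have hj : j < l.length := by omega
  rw [getElem!_pos l i hi, getElem!_pos l j hj]
  have h1 : List.Sublist [l[i]] (l.drop (j+1)) := by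
    rw [List.singleton_sublist]
    have hlen : i - (j+1) < (l.drop (j+1)).length := by
      rw [List.length_drop]; omega
    have : (l.drop (j+1))[i - (j+1)]'hlen = l[i] := by
      rw [List.getElem_drop]; congr 1; omega
    rw [← this]; exact List.getElem_mem _
  have h2 : List.Sublist [l[j], l[i]] (l.drop j) := by
    rw [← (List.getElem_cons_drop (as := l) (i := j))]
    exact List.Sublist.cons₂ _ h1
  exact h2.trans (List.drop_sublist _ _)

lemma idx3_bad3 {l A : List Int} {i j k : Nat} (hkj : k < j) (hji : j < i) (hi : i < l.length)
    (hs : l[i]! + l[j]! + l[k]! ∉ A) : Bad3 l A := by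
  refine ⟨↑[l[k]!, l[j]!, l[i]!], ?_, by simp, ?_⟩
  · exact Multiset.coe_le.mpr (triple_sublist l k j i hkj hji hi).subperm
  · intro hmem
    apply hs
    have he : ((↑[l[k]!, l[j]!, l[i]!] : Multiset Int)).sum = l[i]! + l[j]! + l[k]! := by
      simp; ring
    rwa [he] at hmem

lemma idx2_bad2 {l A : List Int} {i j : Nat} (hji : j < i) (hi : i < l.length)
    (hs : l[i]! + l[j]! ∉ A) : Bad2 l A := by
  refine ⟨↑[l[j]!, l[i]!], ?_, by simp, ?_⟩
  · exact Multiset.coe_le.mpr (pair_sublist l j i hji hi).subperm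
  · intro hmem
    apply hs
    have he : ((↑[l[j]!, l[i]!] : Multiset Int)).sum = l[i]! + l[j]! := by
      simp; ring
    rwa [he] at hmem

lemma bad3_idx3 {l A : List Int} (h : Bad3 l A) :
    ∃ i j k, k < j ∧ j < i ∧ i < l.length ∧ l[i]! + l[j]! + l[k]! ∉ A := by
  obtain ⟨t, hle, hcard, hsum⟩ := h
  obtain ⟨a, b, c, rfl⟩ := Multiset.card_eq_three.mp hcard
  obtain ⟨l', hperm, hsub⟩ := Multiset.coe_le.mp (by simpa using hle)
  have hlen : l'.length = 3 := by simpa using hperm.length_eq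
  obtain ⟨x, y, z, rfl⟩ : ∃ x y z, l' = [x, y, z] := by
    match l', hlen with
    | [x, y, z], _ => exact ⟨x, y, z, rfl⟩
  obtain ⟨f, hf⟩ := List.sublist_iff_exists_orderEmbedding_getElem?_eq.mp hsub
  have h0 := hf 0
  have h1 := hf 1
  have h2 := hf 2
  simp at h0 h1 h2
  have hf2 : f 2 < l.length := by
    by_contra hge
    rw [List.getElem?_eq_none (by omega)] at h2
    simp at h2
  have hf1lt : f 1 < f 2 := f.strictMono (by omega)
  have hf0lt : f 0 < f 1 := f.strictMono (by omega)
  refine ⟨f 2, f 1, f 0, hf0lt, hf1lt, hf2, ?_⟩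
  have hx : l[f 0]! = x := by
    obtain ⟨hh, hval⟩ := List.getElem?_eq_some_iff.mp h0.symm
    rw [getElem!_pos l (f 0) (by omega), hval]
  have hy : l[f 1]! = y := by
    obtain ⟨hh, hval⟩ := List.getElem?_eq_some_iff.mp h1.symm
    rw [getElem!_pos l (f 1) (by omega), hval]
  have hz : l[f 2]! = z := by
    obtain ⟨hh, hval⟩ := List.getElem?_eq_some_iff.mp h2.symm
    rw [getElem!_pos l (f 2) (by omega), hval]
  rw [hx, hy, hz]
  intro hmem
  apply hsum
  have hsum3 : x + y + z = a + b + c := by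
    have hh := hperm.sum_eq
    simp [List.sum_cons] at hh
    linarith
  have he : ({a, b, c} : Multiset Int).sum = a + b + c := by
    simp; ring
  rw [he]
  have hzx : z + y + x = a + b + c := by linarith
  rwa [hzx] at hmem

lemma bad2_idx2 {l A : List Int} (h : Bad2 l A) :
    ∃ i j, j < i ∧ i < l.length ∧ l[i]! + l[j]! ∉ A := by
  obtain ⟨t, hle, hcard, hsum⟩ := h
  obtain ⟨a, b, rfl⟩ := Multiset.card_eq_two.mp hcard
  obtain ⟨l', hperm, hsub⟩ := Multiset.coe_le.mp (by simpa using hle)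
  have hlen : l'.length = 2 := by simpa using hperm.length_eq
  obtain ⟨x, y, rfl⟩ : ∃ x y, l' = [x, y] := by
    match l', hlen with
    | [x, y], _ => exact ⟨x, y, rfl⟩
  obtain ⟨f, hf⟩ := List.sublist_iff_exists_orderEmbedding_getElem?_eq.mp hsub
  have h0 := hf 0
  have h1 := hf 1
  simp at h0 h1
  have hf1 : f 1 < l.length := by
    by_contra hge
    rw [List.getElem?_eq_none (by omega)] at h1
    simp at h1
  have hf0lt : f 0 < f 1 := f.strictMono (by omega)
  refine ⟨f 1, f 0, hf0lt, hf1, ?_⟩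
  have hx : l[f 0]! = x := by
    obtain ⟨hh, hval⟩ := List.getElem?_eq_some_iff.mp h0.symm
    rw [getElem!_pos l (f 0) (by omega), hval]
  have hy : l[f 1]! = y := by
    obtain ⟨hh, hval⟩ := List.getElem?_eq_some_iff.mp h1.symm
    rw [getElem!_pos l (f 1) (by omega), hval]
  rw [hx, hy]
  intro hmem
  apply hsum
  have hh := hperm.sum_eq
  simp [List.sum_cons] at hh
  have he : ({a, b} : Multiset Int).sum = a + b := by simp
  rw [he]
  have hyx : y + x = a + b := by linarith
  rwa [hyx] at hmem

lemma pos3_bad3 {A : List Int} (h : 3 ≤ A.countP fun a => decide (0 < a)) : Bad3 A A := by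
  set P := A.filter (fun a => decide (0 < a)) with hP
  have hlen : 3 ≤ P.length := by rw [hP, ← List.countP_eq_length_filter]; exact h
  have hpos : 0 < P.length := by omega
  set m := P.maximum_of_length_pos hpos with hm
  have hmem : m ∈ P := List.maximum_of_length_pos_mem hpos
  have hbound : ∀ x ∈ P, x ≤ m := fun x hx => List.le_maximum_of_length_pos_of_mem hx hpos
  have herase : 2 ≤ (P.erase m).length := by
    rw [List.length_erase_of_mem hmem]; omega
  obtain ⟨p, q, rest, hpq⟩ : ∃ p q rest, P.erase m = p :: q :: rest := by
    match hE : P.erase m, herase with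
    | p :: q :: rest, _ => exact ⟨p, q, rest, rfl⟩
  have hpmem : p ∈ P := (List.erase_sublist).subset (by rw [hpq]; simp)
  have hqmem : q ∈ P := (List.erase_sublist).subset (by rw [hpq]; simp)
  have hppos : 0 < p := by have := (List.mem_filter.mp (hP ▸ hpmem)).2; simpa using this
  have hqpos : 0 < q := by have := (List.mem_filter.mp (hP ▸ hqmem)).2; simpa using this
  have hmpos : 0 < m := by have := (List.mem_filter.mp (hP ▸ hmem)).2; simpa using this
  refine ⟨m ::ₘ ↑[p, q], ?_, by simp, ?_⟩
  · have h1 : (↑[p, q] : Multiset Int) ≤ (↑(P.erase m) : Multiset Int) := by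
      apply Multiset.coe_le.mpr
      apply List.Sublist.subperm
      rw [hpq]
      exact (List.cons_sublist_cons.mpr (List.cons_sublist_cons.mpr (List.nil_sublist rest)))
    have h2 : (↑(P.erase m) : Multiset Int) = (↑P : Multiset Int).erase m := Multiset.coe_erase P m
    have h3 : m ::ₘ ↑[p, q] ≤ ↑P := cons_le_of_mem_of_le_erase (by simpa using hmem) (h2 ▸ h1)
    have h4 : (↑P : Multiset Int) ≤ ↑A := Multiset.coe_le.mpr (List.filter_sublist).subperm
    exact h3.trans h4
  · intro hmemA
    have hsum : (m ::ₘ (↑[p, q] : Multiset Int)).sum = m + p + q := by simp; ring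
    rw [hsum] at hmemA
    have hx : m + p + q ≤ m := by
      apply hbound
      rw [hP]
      apply List.mem_filter.mpr
      exact ⟨hmemA, by simpa using by omega⟩
    omega

lemma neg3_bad3 {A : List Int} (h : 3 ≤ A.countP fun a => decide (a < 0)) : Bad3 A A := by
  set P := A.filter (fun a => decide (a < 0)) with hP
  have hlen : 3 ≤ P.length := by rw [hP, ← List.countP_eq_length_filter]; exact h
  have hpos : 0 < P.length := by omega
  set m := P.minimum_of_length_pos hpos with hm
  have hmem : m ∈ P := List.minimum_of_length_pos_mem hpos
  have hbound : ∀ x ∈ P, m ≤ x := fun x hx => List.minimum_of_length_pos_le_of_mem hx hpos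
  have herase : 2 ≤ (P.erase m).length := by
    rw [List.length_erase_of_mem hmem]; omega
  obtain ⟨p, q, rest, hpq⟩ : ∃ p q rest, P.erase m = p :: q :: rest := by
    match hE : P.erase m, herase with
    | p :: q :: rest, _ => exact ⟨p, q, rest, rfl⟩
  have hpmem : p ∈ P := (List.erase_sublist).subset (by rw [hpq]; simp)
  have hqmem : q ∈ P := (List.erase_sublist).subset (by rw [hpq]; simp)
  have hppos : p < 0 := by have := (List.mem_filter.mp (hP ▸ hpmem)).2; simpa using this
  have hqpos : q < 0 := by have := (List.mem_filter.mp (hP ▸ hqmem)).2; simpa using this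
  have hmpos : m < 0 := by have := (List.mem_filter.mp (hP ▸ hmem)).2; simpa using this
  refine ⟨m ::ₘ ↑[p, q], ?_, by simp, ?_⟩
  · have h1 : (↑[p, q] : Multiset Int) ≤ (↑(P.erase m) : Multiset Int) := by
      apply Multiset.coe_le.mpr
      apply List.Sublist.subperm
      rw [hpq]
      exact (List.cons_sublist_cons.mpr (List.cons_sublist_cons.mpr (List.nil_sublist rest)))
    have h2 : (↑(P.erase m) : Multiset Int) = (↑P : Multiset Int).erase m := Multiset.coe_erase P m
    have h3 : m ::ₘ ↑[p, q] ≤ ↑P := cons_le_of_mem_of_le_erase (by simpa using hmem) (h2 ▸ h1)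
    have h4 : (↑P : Multiset Int) ≤ ↑A := Multiset.coe_le.mpr (List.filter_sublist).subperm
    exact h3.trans h4
  · intro hmemA
    have hsum : (m ::ₘ (↑[p, q] : Multiset Int)).sum = m + p + q := by simp; ring
    rw [hsum] at hmemA
    have hx : m ≤ m + p + q := by
      apply hbound
      rw [hP]
      apply List.mem_filter.mpr
      exact ⟨hmemA, by simpa using by omega⟩
    omega

lemma bad3_filter {A : List Int} (h : Bad3 (A.filter fun a => decide (a ≠ 0)) A) : Bad3 A A := by
  obtain ⟨t, hle, hcard, hsum⟩ := h
  exact ⟨t, hle.trans (Multiset.coe_le.mpr (List.filter_sublist).subperm), hcard, hsum⟩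

lemma bad2_zero_bad3 {A : List Int} (h0 : (0:Int) ∈ A)
    (h : Bad2 (A.filter fun a => decide (a ≠ 0)) A) : Bad3 A A := by
  obtain ⟨t, hle, hcard, hsum⟩ := h
  refine ⟨(0:Int) ::ₘ t, ?_, by simpa using hcard, by simpa using hsum⟩
  rw [Multiset.le_iff_count] at hle ⊢
  intro x
  have hx := hle x
  rw [Multiset.count_cons, Multiset.coe_count]
  rw [Multiset.coe_count] at hx
  by_cases hx0 : x = 0
  · subst hx0
    have hz : (List.filter (fun a => decide (a ≠ 0)) A).count (0:Int) = 0 := by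
      apply List.count_eq_zero.mpr
      intro hmem
      simpa using (List.mem_filter.mp hmem).2
    rw [hz] at hx
    have : 0 < A.count (0:Int) := List.count_pos_iff.mpr h0
    simp only [if_true]
    omega
  · rw [if_neg hx0]
    rw [List.count_filter (by simpa using hx0)] at hx
    omega

lemma pair_le_filter {A : List Int} {b c : Int} (hb : b ≠ 0) (hc : c ≠ 0)
    (hle : ({0, b, c} : Multiset Int) ≤ (A : Multiset Int)) :
    ({b, c} : Multiset Int) ≤ ((A.filter fun a => decide (a ≠ 0)) : List Int) := by
  rw [Multiset.le_iff_count] at hle ⊢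
  intro x
  have hx := hle x
  rw [Multiset.coe_count] at hx ⊢
  by_cases hx0 : x = 0
  · subst hx0
    have : Multiset.count (0:Int) ({0, b, c} : Multiset Int) ≥ Multiset.count (0:Int) ({b,c} : Multiset Int) := by
      simp [Multiset.count_cons]
    have hcnt : Multiset.count (0:Int) ({b, c} : Multiset Int) = 0 := by
      simp [Multiset.count_cons]
      omega
    rw [hcnt]
    omega
  · rw [List.count_filter (by simpa using hx0)]
    have : Multiset.count x ({b, c} : Multiset Int) ≤ Multiset.count x ({0, b, c} : Multiset Int) := by
      simp [Multiset.count_cons, hx0]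
    omega

lemma triple_le_filter {A : List Int} {a b c : Int} (ha : a ≠ 0) (hb : b ≠ 0) (hc : c ≠ 0)
    (hle : ({a, b, c} : Multiset Int) ≤ (A : Multiset Int)) :
    ({a, b, c} : Multiset Int) ≤ ((A.filter fun x => decide (x ≠ 0)) : List Int) := by
  rw [Multiset.le_iff_count] at hle ⊢
  intro x
  have hx := hle x
  rw [Multiset.coe_count] at hx ⊢
  by_cases hx0 : x = 0
  · subst hx0
    have hcnt : Multiset.count (0:Int) ({a, b, c} : Multiset Int) = 0 := by
      simp [Multiset.count_cons]
      omega
    rw [hcnt]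
    omega
  · rw [List.count_filter (by simpa using hx0)]
    omega

lemma one_zero_case {A : List Int} {b c : Int} (hb : b ≠ 0) (hc : c ≠ 0)
    (hle : ({0, b, c} : Multiset Int) ≤ (A : Multiset Int))
    (hsum : b + c ∉ A) :
    (0:Int) ∈ A ∧ Bad2 (A.filter fun a => decide (a ≠ 0)) A := by
  constructor
  · have : (0:Int) ∈ ({0, b, c} : Multiset Int) := by simp
    simpa using Multiset.mem_of_le hle this
  · exact ⟨{b, c}, pair_le_filter hb hc hle, by simp, by simpa using hsum⟩

lemma bad3_split {A : List Int} (h : Bad3 A A) :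
    ((0:Int) ∈ A ∧ Bad2 (A.filter fun a => decide (a ≠ 0)) A) ∨
      Bad3 (A.filter fun a => decide (a ≠ 0)) A := by
  obtain ⟨t, hle, hcard, hsum⟩ := h
  obtain ⟨a, b, c, rfl⟩ := Multiset.card_eq_three.mp hcard
  have hmemA : ∀ x ∈ ({a, b, c} : Multiset Int), x ∈ A := by
    intro x hx
    simpa using Multiset.mem_of_le hle hx
  have hsumv : ({a, b, c} : Multiset Int).sum = a + b + c := by simp; ring
  rw [hsumv] at hsum
  by_cases ha : a = 0
  · subst ha
    by_cases hbz : b = 0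
    · subst hbz
      exfalso
      exact hsum (by simpa using hmemA c (by simp))
    · by_cases hcz : c = 0
      · subst hcz
        exfalso
        exact hsum (by simpa using hmemA b (by simp))
      · exact Or.inl (one_zero_case hbz hcz hle (by simpa using hsum))
  · by_cases hbz : b = 0
    · subst hbz
      by_cases hcz : c = 0
      · subst hcz
        exfalso
        exact hsum (by simpa using hmemA a (by simp))
      · have hle' : ({0, a, c} : Multiset Int) ≤ (A : Multiset Int) := by
          have e : ({a, 0, c} : Multiset Int) = ({0, a, c} : Multiset Int) := by
            ext x
            simp [Multiset.count_cons, Multiset.count_singleton]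
            split_ifs <;> omega
          rwa [e] at hle
        exact Or.inl (one_zero_case ha hcz hle' (by
          intro hm; apply hsum; have : a + 0 + c = a + c := by ring
          rwa [this]))
    · by_cases hcz : c = 0
      · subst hcz
        have hle' : ({0, a, b} : Multiset Int) ≤ (A : Multiset Int) := by
          have e : ({a, b, 0} : Multiset Int) = ({0, a, b} : Multiset Int) := by
            ext x
            simp [Multiset.count_cons, Multiset.count_singleton]
            split_ifs <;> omega
          rwa [e] at hle
        exact Or.inl (one_zero_case ha hbz hle' (by
          intro hm; apply hsum; have : a + b + 0 = a + b := by ring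
          rwa [this]))
      · refine Or.inr ⟨{a, b, c}, triple_le_filter ha hbz hcz hle, by simp, ?_⟩
        rw [hsumv]
        exact hsum

lemma loopB_iff (A : List Int) :
    ((List.range A.length).any (fun i => (List.range' (i+1) (A.length - (i+1))).any (fun j =>
       (List.range' (j+1) (A.length - (j+1))).any (fun k =>
         !((PySem.Set.ofList A).contains (A[i]! + A[j]! + A[k]!)))))) = true
    ↔ Bad3 A A := by
  simp only [List.any_eq_true, List.mem_range, List.mem_range'_1, Bool.not_eq_true']
  constructor
  · rintro ⟨i, hi, j, ⟨hj1, hj2⟩, k, ⟨hk1, hk2⟩, hc⟩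
    have hklen : k < A.length := by omega
    have hsum : A[k]! + A[j]! + A[i]! ∉ A := by
      have e : A[k]! + A[j]! + A[i]! = A[i]! + A[j]! + A[k]! := by ring
      rw [e]
      simpa [pysem] using hc
    exact idx3_bad3 (by omega) (by omega) hklen hsum
  · intro h
    obtain ⟨i, j, k, hkj, hji, hi, hs⟩ := bad3_idx3 h
    refine ⟨k, by omega, j, ⟨by omega, by omega⟩, i, ⟨by omega, by omega⟩, ?_⟩
    have e : A[k]! + A[j]! + A[i]! = A[i]! + A[j]! + A[k]! := by ring
    simp only [pysem, e]
    simpa [pysem] using hs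


lemma loopA_iff (A : List Int) (zb : Bool) :
    (((List.range (A.filter fun a => decide (a ≠ 0)).length).any (fun i => (List.range i).any (fun j =>
        (zb && !((PySem.Set.ofList A).contains ((A.filter fun a => decide (a ≠ 0))[i]! + (A.filter fun a => decide (a ≠ 0))[j]!))) ||
        (List.range j).any (fun k =>
          !((PySem.Set.ofList A).contains ((A.filter fun a => decide (a ≠ 0))[i]! + (A.filter fun a => decide (a ≠ 0))[j]! + (A.filter fun a => decide (a ≠ 0))[k]!)))))) = true)
    ↔ ((zb = true ∧ Bad2 (A.filter fun a => decide (a ≠ 0)) A) ∨ Bad3 (A.filter fun a => decide (a ≠ 0)) A) := by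
  set F := A.filter fun a => decide (a ≠ 0) with hF
  simp only [List.any_eq_true, List.mem_range, Bool.or_eq_true, Bool.and_eq_true, Bool.not_eq_true']
  constructor
  · rintro ⟨i, hi, j, hj, ⟨hzb, hc⟩ | ⟨k, hk, hc⟩⟩
    · refine Or.inl ⟨hzb, ?_⟩
      exact idx2_bad2 hj hi (by simpa [pysem] using hc)
    · refine Or.inr ?_
      exact idx3_bad3 hk hj hi (by simpa [pysem] using hc)
  · rintro (⟨hzb, h2⟩ | h3)
    · obtain ⟨i, j, hji, hi, hs⟩ := bad2_idx2 h2
      exact ⟨i, hi, j, hji, Or.inl ⟨hzb, by simpa [pysem] using hs⟩⟩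
    · obtain ⟨i, j, k, hkj, hji, hi, hs⟩ := bad3_idx3 h3
      exact ⟨i, hi, j, hji, Or.inr ⟨k, hkj, by simpa [pysem] using hs⟩⟩

-- ===== VERDICT (by name: the statement is the Claim_ definition above) =====
theorem solve_spec : Claim_equal_solve := by
  intro N A _
  unfold Spec_solve
  unfold solve solve_alt
  simp only [foldl_count]
  have hzb : (decide ((0:Int) + (List.countP (fun a => decide (a = 0)) A : Nat) ≠ 0) = true) ↔ (0:Int) ∈ A := by
    rw [decide_eq_true_iff]
    have h1 : ((0:Int) + (List.countP (fun a => decide (a = 0)) A : Nat) ≠ 0) ↔ List.countP (fun a => decide (a = 0)) A ≠ 0 := by omega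
    rw [h1, Ne, List.countP_eq_zero]
    simp
  by_cases hp : 3 ≤ A.countP (fun a => decide (0 < a)) ∨ 3 ≤ A.countP (fun a => decide (a < 0))
  · have hbad : Bad3 A A := hp.elim pos3_bad3 neg3_bad3
    rw [if_pos (by omega), if_pos ((loopB_iff A).mpr hbad)]
  · rw [if_neg (by omega)]
    by_cases hL : ((List.range (A.filter fun a => decide (a ≠ 0)).length).any (fun i => (List.range i).any (fun j =>
        ((decide ((0:Int) + (List.countP (fun a => decide (a = 0)) A : Nat) ≠ 0)) && !((PySem.Set.ofList A).contains ((A.filter fun a => decide (a ≠ 0))[i]! + (A.filter fun a => decide (a ≠ 0))[j]!))) ||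
        (List.range j).any (fun k =>
          !((PySem.Set.ofList A).contains ((A.filter fun a => decide (a ≠ 0))[i]! + (A.filter fun a => decide (a ≠ 0))[j]! + (A.filter fun a => decide (a ≠ 0))[k]!)))))) = true
    · rw [if_pos hL]
      rcases (loopA_iff A _).mp hL with ⟨hz, h2⟩ | h3
      · rw [if_pos ((loopB_iff A).mpr (bad2_zero_bad3 (hzb.mp hz) h2))]
      · rw [if_pos ((loopB_iff A).mpr (bad3_filter h3))]
    · rw [if_neg hL]
      by_cases hR : ((List.range A.length).any (fun i => (List.range' (i+1) (A.length - (i+1))).any (fun j =>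
         (List.range' (j+1) (A.length - (j+1))).any (fun k =>
           !((PySem.Set.ofList A).contains (A[i]! + A[j]! + A[k]!)))))) = true
      · exfalso
        apply hL
        apply (loopA_iff A _).mpr
        rcases bad3_split ((loopB_iff A).mp hR) with ⟨h0, h2⟩ | h3
        · exact Or.inl ⟨hzb.mpr h0, h2⟩
        · exact Or.inr h3
      · rw [if_neg hR]
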